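-- pv_equiv track=rewrite | github.com/xunto-herzen-ivt4/lzss_compression | lzss.py | find_in_dict
-- ===== SOURCE A (Python) =====
-- def find_in_dict(buffer, dictionary):
--     shift = len(dictionary)
--     substring = ""
--
--     for character in buffer:
--         substring_tmp = substring + character
--         shift_tmp = dictionary.rfind(substring_tmp)
--
--         if shift_tmp < 0:
--             break
--
--         substring = substring_tmp
--         shift = shift_tmp
--
--     return len(substring), len(dictionary) - shift
-- ===== SOURCE B (Python) =====
-- def find_in_dict(buffer, dictionary):
--     # One left-to-right pass over dictionary positions: at each position compute the
--     # length of the common prefix with buffer, keeping the maximum (rightmost on ties).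
--     n = len(dictionary)
--     best_len = 0
--     best_pos = n
--     for i in range(n):
--         l = 0
--         while l < len(buffer) and i + l < n and buffer[l] == dictionary[i + l]:
--             l += 1
--         if l >= best_len and l > 0:
--             best_len = l
--             best_pos = i
--     return best_len, n - best_pos
-- ===== Notes on version B (the rewrite author's own statement) =====
-- stated objective: alternative
-- what changed: Replaces the grow-prefix-and-rfind loop (a full rfind over the dictionary per buffer character) by a single left-to-right scan over dictionary positions that computes the common-prefix length with the buffer at each position, keeping the maximum and its rightmost position.
import Mathlib
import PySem

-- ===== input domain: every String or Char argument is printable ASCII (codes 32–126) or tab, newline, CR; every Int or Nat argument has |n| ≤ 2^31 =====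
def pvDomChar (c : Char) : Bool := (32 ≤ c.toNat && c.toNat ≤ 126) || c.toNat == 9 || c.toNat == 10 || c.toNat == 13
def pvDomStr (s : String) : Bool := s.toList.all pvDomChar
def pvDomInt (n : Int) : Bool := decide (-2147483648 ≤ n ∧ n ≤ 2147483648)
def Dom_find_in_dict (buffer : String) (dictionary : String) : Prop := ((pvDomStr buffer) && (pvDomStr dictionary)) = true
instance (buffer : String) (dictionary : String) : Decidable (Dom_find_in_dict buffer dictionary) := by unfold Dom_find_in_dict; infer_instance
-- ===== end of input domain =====

-- B replaces A's grow-prefix-with-rfind loop by one left-to-right scan over dictionary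
-- positions computing the common-prefix length with the buffer at each position
-- (alternative algorithm, O(m*n) vs A's O(m^2*n) worst case; not measured faster in CPython).

-- ===== PORT A =====
-- the for-loop of A (with its break) as structural recursion over the buffer characters
def findADloop (dict : List Char) : List Char → List Char → Int → (List Char × Int)
  | [], substring, shift => (substring, shift)
  | character :: rest, substring, shift =>
      let substring_tmp := substring ++ [character]
      let shift_tmp := PySem.Chars.rfind dict substring_tmp
      if shift_tmp < 0 then (substring, shift)
      else findADloop dict rest substring_tmp shift_tmp

def find_in_dict (buffer : String) (dictionary : String) : List Int :=
  let d := dictionary.toList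
  let res := findADloop d buffer.toList [] (d.length : Int)
  [(res.1.length : Int), (d.length : Int) - res.2]

-- ===== PORT B =====
-- the inner while-loop of B: common-prefix length of buffer and dictionary[i:], counting from l
def lcpGo (buf dict : List Char) (i : Nat) (l : Nat) : Nat :=
  if h : l < buf.length ∧ i + l < dict.length ∧ buf[l]! = dict[i + l]! then
    lcpGo buf dict i (l + 1)
  else l
termination_by buf.length - l
decreasing_by omega

def find_in_dict_alt (buffer : String) (dictionary : String) : List Int :=
  let buf := buffer.toList
  let d := dictionary.toList
  let n := d.length
  let st := (List.range n).foldl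
    (fun (st : Nat × Nat) i =>
      let l := lcpGo buf d i 0
      if l ≥ st.1 ∧ l > 0 then (l, i) else st) (0, n)
  [(st.1 : Int), (n : Int) - (st.2 : Int)]

-- ===== PRECONDITION & SPEC =====
def Spec_find_in_dict (buffer : String) (dictionary : String) (out : List Int) : Prop := out = find_in_dict_alt buffer dictionary
instance (buffer : String) (dictionary : String) (out : List Int) : Decidable (Spec_find_in_dict buffer dictionary out) := by unfold Spec_find_in_dict; infer_instance

-- ===== CLAIM (what is proved, stated in full; the proofs are below) =====
def Claim_equal_find_in_dict : Prop := ∀ (buffer : String) (dictionary : String), Dom_find_in_dict buffer dictionary → Spec_find_in_dict buffer dictionary (find_in_dict buffer dictionary)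

-- ===== LEMMAS AND PROOFS =====

-- L = the length of the longest prefix of buf that is a substring (infix) of d
def Lval (buf d : List Char) : Nat :=
  Nat.findGreatest (fun k => buf.take k <:+: d) buf.length

theorem Lval_le (buf d : List Char) : Lval buf d ≤ buf.length :=
  Nat.findGreatest_le _

theorem Lval_infix (buf d : List Char) : buf.take (Lval buf d) <:+: d := by
  have h0 : buf.take 0 <:+: d := by simp
  exact Nat.findGreatest_spec (P := fun k => buf.take k <:+: d) (Nat.zero_le buf.length) h0

theorem le_Lval (buf d : List Char) {k : Nat} (hk : k ≤ buf.length)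
    (h : buf.take k <:+: d) : k ≤ Lval buf d :=
  Nat.le_findGreatest hk h

-- infix ↔ prefix of some drop
theorem infix_iff_drop (sub s : List Char) : sub <:+: s ↔ ∃ i, sub <+: s.drop i := by
  rw [← PySem.Chars.isIn_iff_infix, ← PySem.Chars.exists_prefix_drop_iff_isIn]

theorem rfind_go_zero (s sub : List Char) :
    PySem.Chars.rfind.go s sub 0 = if sub.isPrefixOf s then 0 else -1 := by
  rw [PySem.Chars.rfind.go]

theorem rfind_go_succ (s sub : List Char) (j : Nat) :
    PySem.Chars.rfind.go s sub (j + 1) =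
      if sub.isPrefixOf (s.drop (j + 1)) then ((j + 1 : Nat) : Int)
      else PySem.Chars.rfind.go s sub j := by
  rw [PySem.Chars.rfind.go]

-- characterization of PySem.Chars.rfind.go
theorem rfind_go_spec (s sub : List Char) (k : Nat) :
    (PySem.Chars.rfind.go s sub k = -1 ∧ ∀ i ≤ k, ¬ sub <+: s.drop i) ∨
    (∃ i : Nat, PySem.Chars.rfind.go s sub k = (i : Int) ∧ i ≤ k ∧ sub <+: s.drop i ∧
      ∀ j : Nat, i < j → j ≤ k → ¬ sub <+: s.drop j) := by
  induction k with
  | zero =>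
    rw [rfind_go_zero]
    by_cases h : sub.isPrefixOf s
    · right
      refine ⟨0, by simp [h], le_refl 0, by simpa using List.isPrefixOf_iff_prefix.mp h, ?_⟩
      intro j h1 h2; omega
    · left
      refine ⟨by simp [h], ?_⟩
      intro i hi
      rw [Nat.le_zero] at hi; subst hi
      simpa using fun hp => h (List.isPrefixOf_iff_prefix.mpr hp)
  | succ j ih =>
    rw [rfind_go_succ]
    by_cases h : sub.isPrefixOf (s.drop (j + 1))
    · right
      refine ⟨j + 1, by simp [h], le_refl _, List.isPrefixOf_iff_prefix.mp h, ?_⟩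
      intro k h1 h2; omega
    · rcases ih with ⟨h1, h2⟩ | ⟨i, hi1, hi2, hi3, hi4⟩
      · left
        refine ⟨by simp [h, h1], ?_⟩
        intro i hi
        rcases Nat.lt_or_ge i (j + 1) with hlt | hge
        · exact h2 i (by omega)
        · have : i = j + 1 := by omega
          subst this
          exact fun hp => h (List.isPrefixOf_iff_prefix.mpr hp)
      · right
        refine ⟨i, by simp [h, hi1], by omega, hi3, ?_⟩
        intro k h1 h2
        rcases Nat.lt_or_ge k (j + 1) with hlt | hge
        · exact hi4 k h1 (by omega)
        · have : k = j + 1 := by omega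
          subst this
          exact fun hp => h (List.isPrefixOf_iff_prefix.mpr hp)

theorem rfind_nil_right (s : List Char) : PySem.Chars.rfind s [] = (s.length : Int) := by
  show PySem.Chars.rfind.go s [] s.length = (s.length : Int)
  cases hn : s.length with
  | zero => rw [rfind_go_zero]; simp
  | succ j => rw [rfind_go_succ]; simp

-- extending a prefix by one matching character
theorem prefix_snoc {a b : List Char} {x : Char} (hab : a <+: b)
    (hl : a.length < b.length) (hx : b[a.length] = x) : a ++ [x] <+: b := by
  rw [List.prefix_iff_eq_take] at hab ⊢
  rw [List.length_append, List.length_singleton, List.take_add_one]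
  rw [List.getElem?_eq_getElem hl, hx]
  simpa using congrArg (fun t => t ++ [x]) hab

-- A's loop invariant
theorem loopA (buf d : List Char) : ∀ j, j ≤ buf.length → buf.take j <:+: d →
    findADloop d (buf.drop j) (buf.take j) (PySem.Chars.rfind d (buf.take j))
      = (buf.take (Lval buf d), PySem.Chars.rfind d (buf.take (Lval buf d))) := by
  have hbase : ∀ j, j = buf.length → buf.take j <:+: d →
      findADloop d (buf.drop j) (buf.take j) (PySem.Chars.rfind d (buf.take j))
        = (buf.take (Lval buf d), PySem.Chars.rfind d (buf.take (Lval buf d))) := by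
    intro j hj hp
    have hL : Lval buf d = j := by
      have h1 := Lval_le buf d
      have h2 := le_Lval buf d (k := j) (by omega) hp
      omega
    rw [List.drop_eq_nil_of_le (by omega), hL]
    rfl
  have key : ∀ n j, buf.length - j ≤ n → j ≤ buf.length → buf.take j <:+: d →
      findADloop d (buf.drop j) (buf.take j) (PySem.Chars.rfind d (buf.take j))
        = (buf.take (Lval buf d), PySem.Chars.rfind d (buf.take (Lval buf d))) := by
    intro n
    induction n with
    | zero =>
      intro j h0 hj hp
      exact hbase j (by omega) hp
    | succ n ih =>
      intro j h0 hj hp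
      rcases Nat.eq_or_lt_of_le hj with he | hlt
      · exact hbase j he hp
      · rw [List.drop_eq_getElem_cons hlt]
        have hsnoc : buf.take j ++ [buf[j]] = buf.take (j + 1) := by
          rw [List.take_add_one, List.getElem?_eq_getElem hlt]
          rfl
        show (let substring_tmp := buf.take j ++ [buf[j]];
              let shift_tmp := PySem.Chars.rfind d substring_tmp;
              if shift_tmp < 0 then (buf.take j, PySem.Chars.rfind d (buf.take j))
              else findADloop d (buf.drop (j + 1)) substring_tmp shift_tmp)
            = (buf.take (Lval buf d), PySem.Chars.rfind d (buf.take (Lval buf d)))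
        simp only [hsnoc]
        by_cases hneg : PySem.Chars.rfind d (buf.take (j + 1)) < 0
        · rw [if_pos hneg]
          have hspec := rfind_go_spec d (buf.take (j + 1)) d.length
          have hnotinf : ¬ buf.take (j + 1) <:+: d := by
            intro hinf
            rcases hspec with ⟨h1, h2⟩ | ⟨i, hi1, hi2, hi3, hi4⟩
            · rcases (infix_iff_drop _ _).mp hinf with ⟨i, hi⟩
              by_cases hle : i ≤ d.length
              · exact h2 i hle hi
              · refine h2 d.length (le_refl _) ?_
                rw [List.drop_length]
                rw [List.drop_eq_nil_of_le (by omega)] at hi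
                exact hi
            · have : PySem.Chars.rfind d (buf.take (j + 1)) = (i : Int) := hi1
              omega
          have hL : Lval buf d = j := by
            have h1 := Lval_le buf d
            have h2 := le_Lval buf d (k := j) (by omega) hp
            by_cases hle : Lval buf d ≤ j
            · omega
            · exfalso
              exact hnotinf ((List.take_prefix_take_left (by omega)).isInfix.trans (Lval_infix buf d))
          rw [hL]
        · have hp1 : buf.take (j + 1) <:+: d := by
            rcases rfind_go_spec d (buf.take (j + 1)) d.length with ⟨h1, _⟩ | ⟨i, hi1, hi2, hi3, _⟩
            · exfalso
              apply hneg
              show PySem.Chars.rfind.go d (buf.take (j + 1)) d.length < 0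
              rw [h1]; norm_num
            · exact (infix_iff_drop _ _).mpr ⟨i, hi3⟩
          rw [if_neg hneg]
          exact ih (j + 1) (by omega) (by omega) hp1
  intro j hj hp
  exact key (buf.length - j) j (le_refl _) hj hp

theorem A_char (buffer dictionary : String) :
    find_in_dict buffer dictionary =
      [(Lval buffer.toList dictionary.toList : Int),
       (dictionary.toList.length : Int) -
         PySem.Chars.rfind dictionary.toList (buffer.toList.take (Lval buffer.toList dictionary.toList))] := by
  have h0 := loopA buffer.toList dictionary.toList 0 (Nat.zero_le _)
    (by simp only [List.take_zero]; exact (List.nil_infix : ([] : List Char) <:+: dictionary.toList))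
  simp only [List.drop_zero, List.take_zero] at h0
  rw [rfind_nil_right] at h0
  show [((findADloop dictionary.toList buffer.toList [] (dictionary.toList.length : Int)).1.length : Int),
        (dictionary.toList.length : Int) - (findADloop dictionary.toList buffer.toList [] (dictionary.toList.length : Int)).2] = _
  rw [h0]
  have hlen : (buffer.toList.take (Lval buffer.toList dictionary.toList)).length
      = Lval buffer.toList dictionary.toList := by
    rw [List.length_take]
    have := Lval_le buffer.toList dictionary.toList
    omega
  rw [hlen]

-- B's inner loop characterization
theorem lcpGo_spec (buf d : List Char) (i : Nat) : ∀ l, l ≤ buf.length → i + l ≤ d.length →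
    buf.take l <+: d.drop i →
    l ≤ lcpGo buf d i l ∧ lcpGo buf d i l ≤ buf.length ∧ i + lcpGo buf d i l ≤ d.length ∧
      buf.take (lcpGo buf d i l) <+: d.drop i ∧
      ∀ k, lcpGo buf d i l < k → k ≤ buf.length → ¬ buf.take k <+: d.drop i := by
  have key : ∀ n l, buf.length - l ≤ n → l ≤ buf.length → i + l ≤ d.length →
      buf.take l <+: d.drop i →
      l ≤ lcpGo buf d i l ∧ lcpGo buf d i l ≤ buf.length ∧ i + lcpGo buf d i l ≤ d.length ∧
        buf.take (lcpGo buf d i l) <+: d.drop i ∧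
        ∀ k, lcpGo buf d i l < k → k ≤ buf.length → ¬ buf.take k <+: d.drop i := by
    intro n
    induction n with
    | zero =>
      intro l h0 h1 h2 h3
      have hc : ¬ (l < buf.length ∧ i + l < d.length ∧ buf[l]! = d[i + l]!) := by
        intro h; omega
      rw [lcpGo, dif_neg hc]
      exact ⟨le_refl l, h1, h2, h3, fun k hk hkl => absurd hkl (by omega)⟩
    | succ n ih =>
      intro l h0 h1 h2 h3
      by_cases hc : l < buf.length ∧ i + l < d.length ∧ buf[l]! = d[i + l]!
      · obtain ⟨hc1, hc2, hc3⟩ := hc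
        have hpre : buf.take (l + 1) <+: d.drop i := by
          have hlen_take : (buf.take l).length = l := by
            rw [List.length_take]; omega
          have hlt : (buf.take l).length < (d.drop i).length := by
            rw [hlen_take, List.length_drop]; omega
          have hg : (d.drop i)[(buf.take l).length]'hlt = buf[l] := by
            have heq : (d.drop i)[(buf.take l).length]'hlt = d[i + l]'(by omega) := by
              simp [List.getElem_drop, hlen_take]
            rw [heq, ← getElem!_pos d (i + l) (by omega), ← hc3, getElem!_pos buf l hc1]
          have hs := prefix_snoc h3 hlt hg
          rwa [List.take_add_one, List.getElem?_eq_getElem hc1]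
        have hres := ih (l + 1) (by omega) (by omega) (by omega) hpre
        rw [lcpGo, dif_pos ⟨hc1, hc2, hc3⟩]
        exact ⟨by omega, hres.2.1, hres.2.2.1, hres.2.2.2.1, hres.2.2.2.2⟩
      · rw [lcpGo, dif_neg hc]
        refine ⟨le_refl l, h1, h2, h3, ?_⟩
        intro k hk hkl hp
        have hl : l < buf.length := by omega
        push Not at hc
        by_cases hdl : i + l < d.length
        · have hne := hc hl hdl
          have hp1 : buf.take (l + 1) <+: d.drop i :=
            (List.take_prefix_take_left (l := buf) (by omega)).trans hp
          have hlen1 : l < (buf.take (l + 1)).length := by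
            rw [List.length_take]; omega
          have hg := hp1.getElem hlen1
          rw [List.getElem_take] at hg
          rw [List.getElem_drop] at hg
          exact hne (by
            rw [getElem!_pos buf l hl, getElem!_pos d (i + l) (by omega)]
            exact hg)
        · have hlen := hp.length_le
          rw [List.length_take, List.length_drop] at hlen
          omega
  intro l h1 h2 h3
  exact key (buf.length - l) l (le_refl _) h1 h2 h3

-- B's fold invariant
def InvB (buf d : List Char) (m : Nat) (st : Nat × Nat) : Prop :=
  (st.1 = 0 ∧ st.2 = d.length ∧ ∀ i, i < m → lcpGo buf d i 0 = 0) ∨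
  (0 < st.1 ∧ st.2 < m ∧ lcpGo buf d st.2 0 = st.1 ∧ (∀ i, i < m → lcpGo buf d i 0 ≤ st.1) ∧
    ∀ i, st.2 < i → i < m → lcpGo buf d i 0 < st.1)

theorem foldB (buf d : List Char) (m : Nat) :
    InvB buf d m ((List.range m).foldl
      (fun (st : Nat × Nat) i =>
        let l := lcpGo buf d i 0
        if l ≥ st.1 ∧ l > 0 then (l, i) else st) (0, d.length)) := by
  induction m with
  | zero =>
    exact Or.inl ⟨rfl, rfl, fun i h => absurd h (by omega)⟩
  | succ m ih =>
    rw [List.range_succ, List.foldl_append, List.foldl_cons, List.foldl_nil]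
    set st := (List.range m).foldl
      (fun (st : Nat × Nat) i =>
        let l := lcpGo buf d i 0
        if l ≥ st.1 ∧ l > 0 then (l, i) else st) (0, d.length) with hst
    show InvB buf d (m + 1)
      (let l := lcpGo buf d m 0; if l ≥ st.1 ∧ l > 0 then (l, m) else st)
    by_cases hc : lcpGo buf d m 0 ≥ st.1 ∧ lcpGo buf d m 0 > 0
    · simp only [if_pos hc]
      right
      refine ⟨hc.2, by omega, rfl, ?_, ?_⟩
      · intro i hi
        rcases Nat.lt_or_ge i m with him | him
        · rcases ih with ⟨h1, _, h3⟩ | ⟨_, _, _, h4, _⟩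
          · rw [h3 i him]; omega
          · exact le_trans (h4 i him) hc.1
        · have : i = m := by omega
          subst this; exact le_refl _
      · intro i h1 h2; omega
    · simp only [if_neg hc]
      rcases ih with ⟨h1, h2, h3⟩ | ⟨h1, h2, h3, h4, h5⟩
      · left
        have hz : lcpGo buf d m 0 = 0 := by
          by_contra hnz
          exact hc ⟨by omega, by omega⟩
        refine ⟨h1, h2, ?_⟩
        intro i hi
        rcases Nat.lt_or_ge i m with him | him
        · exact h3 i him
        · have : i = m := by omega
          subst this; exact hz
      · right
        have hlb : lcpGo buf d m 0 < st.1 := by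
          by_contra hge
          exact hc ⟨by omega, by omega⟩
        refine ⟨h1, by omega, h3, ?_, ?_⟩
        · intro i hi
          rcases Nat.lt_or_ge i m with him | him
          · exact h4 i him
          · have : i = m := by omega
            subst this; omega
        · intro i hi1 hi2
          rcases Nat.lt_or_ge i m with him | him
          · exact h5 i hi1 him
          · have : i = m := by omega
            subst this; exact hlb

theorem B_char (buffer dictionary : String) :
    find_in_dict_alt buffer dictionary =
      [(Lval buffer.toList dictionary.toList : Int),
       (dictionary.toList.length : Int) -
         PySem.Chars.rfind dictionary.toList (buffer.toList.take (Lval buffer.toList dictionary.toList))] := by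
  set buf := buffer.toList with hbuf
  set d := dictionary.toList with hd
  set L := Lval buf d with hLdef
  set st := (List.range d.length).foldl
    (fun (st : Nat × Nat) i =>
      let l := lcpGo buf d i 0
      if l ≥ st.1 ∧ l > 0 then (l, i) else st) (0, d.length) with hst
  have hshow : find_in_dict_alt buffer dictionary
      = [(st.1 : Int), (d.length : Int) - (st.2 : Int)] := rfl
  rw [hshow]
  have hLle : L ≤ buf.length := Lval_le buf d
  have hspec : ∀ i, i < d.length →
      lcpGo buf d i 0 ≤ buf.length ∧ buf.take (lcpGo buf d i 0) <+: d.drop i ∧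
        ∀ k, lcpGo buf d i 0 < k → k ≤ buf.length → ¬ buf.take k <+: d.drop i := by
    intro i hi
    have h := lcpGo_spec buf d i 0 (Nat.zero_le _) (by omega) (by simp)
    exact ⟨h.2.1, h.2.2.2.1, h.2.2.2.2⟩
  have hlcp_ge : ∀ i, i < d.length → ∀ k, k ≤ buf.length → buf.take k <+: d.drop i →
      k ≤ lcpGo buf d i 0 := by
    intro i hi k hk hp
    by_contra hgt
    exact (hspec i hi).2.2 k (by omega) hk hp
  have hLex : 0 < L → ∃ i, i < d.length ∧ buf.take L <+: d.drop i := by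
    intro hLpos
    rcases (infix_iff_drop _ _).mp (Lval_infix buf d) with ⟨i, hi⟩
    refine ⟨i, ?_, hi⟩
    by_contra hge
    have : d.drop i = [] := List.drop_eq_nil_of_le (by omega)
    rw [this] at hi
    have := hi.length_le
    rw [List.length_take] at this
    simp only [List.length_nil] at this
    omega
  have hinv := foldB buf d d.length
  rw [← hst] at hinv
  unfold InvB at hinv
  rcases hinv with ⟨h1, h2, h3⟩ | ⟨h1, h2, h3, h4, h5⟩
  · -- nothing matched: st = (0, d.length), L = 0
    have hL0 : L = 0 := by
      by_contra hnz
      rcases hLex (by omega) with ⟨i, hin, hpre⟩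
      have := (hspec i hin).2.2 L (by rw [h3 i hin]; omega) hLle hpre
      exact this
    rw [h1, h2, hL0]
    simp [rfind_nil_right]
  · -- some match: st.1 = L and st.2 is the rightmost position of the best match
    have hLeq : st.1 = L := by
      have hle1 : st.1 ≤ L := by
        have hx : buf.take st.1 <+: d.drop st.2 := by
          rw [← h3]; exact (hspec st.2 h2).2.1
        have hinf : buf.take st.1 <:+: d :=
          hx.isInfix.trans (List.drop_suffix st.2 d).isInfix
        exact le_Lval buf d (by rw [← h3]; exact (hspec st.2 h2).1) hinf
      have hle2 : L ≤ st.1 := by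
        rcases hLex (by omega) with ⟨i, hin, hpre⟩
        exact le_trans (hlcp_ge i hin L hLle hpre) (h4 i hin)
      omega
    have htakeLen : (buf.take L).length = L := by
      rw [List.length_take]; omega
    have hprePos : buf.take L <+: d.drop st.2 := by
      rw [← hLeq, ← h3]
      exact (hspec st.2 h2).2.1
    have hrf : PySem.Chars.rfind d (buf.take L) = (st.2 : Int) := by
      rcases rfind_go_spec d (buf.take L) d.length with ⟨_, hnone⟩ | ⟨i0, he, hi0n, hp0, hmax0⟩
      · exact absurd hprePos (hnone st.2 (by omega))
      · have heq2 : i0 = st.2 := by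
          have hge : st.2 ≤ i0 := by
            by_contra hlt2
            exact hmax0 st.2 (by omega) (by omega) hprePos
          have hle : i0 ≤ st.2 := by
            by_contra hgt2
            rcases Nat.lt_or_ge i0 d.length with hi0lt | hi0ge
            · have hbig := hlcp_ge i0 hi0lt L hLle hp0
              have := h5 i0 (by omega) hi0lt
              omega
            · have : d.drop i0 = [] := List.drop_eq_nil_of_le (by omega)
              rw [this] at hp0
              have := hp0.length_le
              rw [htakeLen] at this
              simp only [List.length_nil] at this
              omega
          omega
        show PySem.Chars.rfind.go d (List.take L buf) d.length = (st.2 : Int)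
        rw [he, heq2]
    rw [hrf, hLeq]

-- ===== VERDICT (by name: the statement is the Claim_ definition above) =====
theorem find_in_dict_spec : Claim_equal_find_in_dict := by
  intro buffer dictionary _
  unfold Spec_find_in_dict
  rw [A_char, B_char]
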